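-- pv_equiv track=rewrite | github.com/Pelix05/Sofware-Q | agent/lc_pipeline.py | parse_dynamic_issues
-- ===== SOURCE A (Python) =====
-- def parse_dynamic_issues(report_text: str) -> list:
--     """Parse dynamic analysis report text and return a list of failing test identifiers/details.
--
--     We capture lines that start with '[-]' (fail) and include subsequent indented/detail lines.
--     """
--     if not report_text:
--         return []
--     lines = report_text.splitlines()
--     issues = []
--     i = 0
--     while i < len(lines):
--         ln = lines[i].strip()
--         # Capture both failed tests '[-]' and skipped/important markers '[!]'
--         if ln.startswith('[-]') or ln.startswith('[!]'):
--             # capture this line and following detail lines (which in dynamic_tester are prefixed with a space)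
--             entry_lines = [ln]
--             j = i + 1
--             while j < len(lines) and (lines[j].startswith(' ') or lines[j].strip() == ''):
--                 entry_lines.append(lines[j].rstrip())
--                 j += 1
--             issues.append('\n'.join(entry_lines).strip())
--             i = j
--             continue
--         i += 1
--     return issues
-- ===== SOURCE B (Python) =====
-- def parse_dynamic_issues(report_text: str) -> list:
--     """Single forward pass with an explicit 'current entry' accumulator (no index jumping)."""
--     if not report_text:
--         return []
--     issues = []
--     current = None
--     for line in report_text.splitlines():
--         if current is not None and (line.startswith(' ') or line.strip() == ''):
--             current.append(line.rstrip())
--         else: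
--             if current is not None:
--                 issues.append('\n'.join(current).strip())
--                 current = None
--             s = line.strip()
--             if s.startswith('[-]') or s.startswith('[!]'):
--                 current = [s]
--     if current is not None:
--         issues.append('\n'.join(current).strip())
--     return issues
-- ===== Notes on version B (the rewrite author's own statement) =====
-- stated objective: simpler
-- what changed: Replaced the nested index-jumping while loops with a single forward for-loop over the lines keeping an explicit open-entry accumulator that is flushed when a non-continuation line (or the end) is reached.
import Mathlib
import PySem

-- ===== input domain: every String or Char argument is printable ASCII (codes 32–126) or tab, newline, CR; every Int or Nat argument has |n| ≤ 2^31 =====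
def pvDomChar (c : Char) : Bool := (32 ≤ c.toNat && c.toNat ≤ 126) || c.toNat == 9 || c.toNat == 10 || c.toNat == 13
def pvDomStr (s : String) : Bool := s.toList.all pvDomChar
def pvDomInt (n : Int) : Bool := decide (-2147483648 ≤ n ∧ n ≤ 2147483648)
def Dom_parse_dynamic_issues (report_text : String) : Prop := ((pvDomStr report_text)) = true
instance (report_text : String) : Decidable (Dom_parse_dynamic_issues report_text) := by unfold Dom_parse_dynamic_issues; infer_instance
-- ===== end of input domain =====

-- B: one forward pass with an explicit open-entry accumulator instead of A's nested index-jumping while loops (same behaviour, simpler structure).\nimport Mathlib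


-- ===== PORT A =====
-- inner while: 'while j < len(lines) and (lines[j].startswith(' ') or lines[j].strip() == ""):'
-- returns (entry_lines, j) exactly as the Python loop leaves them
def pvInnerA (lines : List String) (j : Nat) (entry : List String) : List String × Nat :=
  if h : j < lines.length then
    if PySem.Str.startswith lines[j] " " || PySem.Str.strip lines[j] == "" then
      pvInnerA lines (j + 1) (entry ++ [PySem.Str.rstrip lines[j]])
    else (entry, j)
  else (entry, j)
termination_by lines.length - j

theorem pvInnerA_ge (lines : List String) (j : Nat) (entry : List String) :
    j ≤ (pvInnerA lines j entry).2 := by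
  fun_induction pvInnerA lines j entry with
  | case1 j entry h hc ih => exact Nat.le_trans (Nat.le_succ j) ih
  | case2 => simp
  | case3 => simp

-- outer while over the index i
def pvOuterA (lines : List String) (i : Nat) (issues : List String) : List String :=
  if h : i < lines.length then
    let ln := PySem.Str.strip lines[i]
    if PySem.Str.startswith ln "[-]" || PySem.Str.startswith ln "[!]" then
      let r := pvInnerA lines (i + 1) [ln]
      pvOuterA lines r.2 (issues ++ [PySem.Str.strip (PySem.Str.join "\n" r.1)])
    else
      pvOuterA lines (i + 1) issues
  else issues
termination_by lines.length - i
decreasing_by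
  · have h2 := pvInnerA_ge lines (i + 1) [PySem.Str.strip lines[i]]
    omega
  · omega

def parse_dynamic_issues (report_text : String) : List String :=
  if report_text == "" then []
  else pvOuterA (PySem.Str.splitlines report_text) 0 []

-- ===== PORT B =====
-- loop body of B: state = (issues, current open entry)
def pvStepB (st : List String × Option (List String)) (line : String) :
    List String × Option (List String) :=
  match st with
  | (issues, some cur) =>
    if PySem.Str.startswith line " " || PySem.Str.strip line == "" then
      (issues, some (cur ++ [PySem.Str.rstrip line]))
    else
      let issues' := issues ++ [PySem.Str.strip (PySem.Str.join "\n" cur)]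
      let s := PySem.Str.strip line
      if PySem.Str.startswith s "[-]" || PySem.Str.startswith s "[!]" then
        (issues', some [s])
      else (issues', none)
  | (issues, none) =>
    let s := PySem.Str.strip line
    if PySem.Str.startswith s "[-]" || PySem.Str.startswith s "[!]" then
      (issues, some [s])
    else (issues, none)

-- final flush after the loop
def pvFlushB (st : List String × Option (List String)) : List String :=
  match st with
  | (issues, some cur) => issues ++ [PySem.Str.strip (PySem.Str.join "\n" cur)]
  | (issues, none) => issues

def parse_dynamic_issues_alt (report_text : String) : List String :=
  if report_text == "" then []
  else pvFlushB ((PySem.Str.splitlines report_text).foldl pvStepB ([], none))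

-- ===== PRECONDITION & SPEC =====
def Spec_parse_dynamic_issues (report_text : String) (out : List String) : Prop := out = parse_dynamic_issues_alt report_text
instance (report_text : String) (out : List String) : Decidable (Spec_parse_dynamic_issues report_text out) := by unfold Spec_parse_dynamic_issues; infer_instance

-- ===== CLAIM (what is proved, stated in full; the proofs are below) =====
def Claim_equal_parse_dynamic_issues : Prop := ∀ (report_text : String), Dom_parse_dynamic_issues report_text → Spec_parse_dynamic_issues report_text (parse_dynamic_issues report_text)

-- ===== LEMMAS AND PROOFS =====
theorem pvInnerA_foldl (lines : List String) (n : Nat) :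
    ∀ (j : Nat) (entry issues : List String), lines.length ≤ j + n →
    pvFlushB ((lines.drop j).foldl pvStepB (issues, some entry)) =
      pvFlushB ((lines.drop (pvInnerA lines j entry).2).foldl pvStepB
        (issues ++ [PySem.Str.strip (PySem.Str.join "\n" (pvInnerA lines j entry).1)], none)) := by
  induction n with
  | zero =>
    intro j entry issues hle
    have h : ¬ j < lines.length := by omega
    rw [pvInnerA, dif_neg h]
    rw [List.drop_eq_nil_of_le (Nat.le_of_not_lt h)]
    rfl
  | succ n ih =>
    intro j entry issues hle
    by_cases h : j < lines.length
    · rw [pvInnerA, dif_pos h]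
      by_cases hc : (PySem.Str.startswith lines[j] " " || PySem.Str.strip lines[j] == "") = true
      · rw [if_pos hc, List.drop_eq_getElem_cons h, List.foldl_cons]
        simp only [pvStepB]
        rw [if_pos hc]
        exact ih (j + 1) (entry ++ [PySem.Str.rstrip lines[j]]) issues (by omega)
      · rw [if_neg hc, List.drop_eq_getElem_cons h]
        simp only [List.foldl_cons, pvStepB]
        rw [if_neg hc]
    · rw [pvInnerA, dif_neg h]
      rw [List.drop_eq_nil_of_le (Nat.le_of_not_lt h)]
      rfl

theorem pvOuterA_foldl (lines : List String) (n : Nat) :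
    ∀ (i : Nat) (issues : List String), lines.length ≤ i + n →
    pvOuterA lines i issues = pvFlushB ((lines.drop i).foldl pvStepB (issues, none)) := by
  induction n with
  | zero =>
    intro i issues hle
    have h : ¬ i < lines.length := by omega
    rw [pvOuterA, dif_neg h, List.drop_eq_nil_of_le (Nat.le_of_not_lt h)]
    rfl
  | succ n ih =>
    intro i issues hle
    by_cases h : i < lines.length
    · rw [pvOuterA, dif_pos h]
      by_cases hm : (PySem.Str.startswith (PySem.Str.strip lines[i]) "[-]" ||
          PySem.Str.startswith (PySem.Str.strip lines[i]) "[!]") = true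
      · rw [if_pos hm, List.drop_eq_getElem_cons h, List.foldl_cons]
        simp only [pvStepB]
        rw [if_pos hm]
        have hge := pvInnerA_ge lines (i + 1) [PySem.Str.strip lines[i]]
        rw [ih (pvInnerA lines (i + 1) [PySem.Str.strip lines[i]]).2
          (issues ++ [PySem.Str.strip (PySem.Str.join "\n"
            (pvInnerA lines (i + 1) [PySem.Str.strip lines[i]]).1)]) (by omega)]
        exact (pvInnerA_foldl lines n (i + 1) [PySem.Str.strip lines[i]] issues (by omega)).symm
      · rw [if_neg hm, List.drop_eq_getElem_cons h, List.foldl_cons]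
        simp only [pvStepB]
        rw [if_neg hm]
        exact ih (i + 1) issues (by omega)
    · rw [pvOuterA, dif_neg h, List.drop_eq_nil_of_le (Nat.le_of_not_lt h)]
      rfl

-- ===== VERDICT (by name: the statement is the Claim_ definition above) =====
theorem parse_dynamic_issues_spec : Claim_equal_parse_dynamic_issues := by
  intro report_text _
  unfold Spec_parse_dynamic_issues parse_dynamic_issues parse_dynamic_issues_alt
  split
  · rfl
  · simpa using pvOuterA_foldl (PySem.Str.splitlines report_text)
      (PySem.Str.splitlines report_text).length 0 [] (by omega)
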